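-- pv_equiv track=rewrite | github.com/MaksOk1/qr-coding | main.py | set_margins
-- ===== SOURCE A (Python) =====
-- def set_margins(matrix: list, margin_size: int):
--     rows = len(matrix)
--     cols = len(matrix[0])
--     new_rows = 2 * margin_size + rows
--     new_cols = 2 * margin_size + cols
--
--     matrix_with_margin = [[None] * new_cols for _ in range(new_rows)]
--
--     for i in range(rows):
--         for j in range(cols):
--             matrix_with_margin[i + margin_size][j + margin_size] = matrix[i][j]
--
--     return matrix_with_margin
-- ===== SOURCE B (Python) =====
-- def set_margins(matrix: list, margin_size: int):
--     cols = len(matrix[0])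
--     new_cols = 2 * margin_size + cols
--     side = [None] * margin_size
--     blank = lambda: [[None] * new_cols for _ in range(margin_size)]
--     return blank() + [side + row[:cols] + side for row in matrix] + blank()
-- ===== Notes on version B (the rewrite author's own statement) =====
-- stated objective: simpler
-- what changed: B assembles the padded matrix row-by-row by list concatenation (blank margin rows plus side-padded copies of each row) instead of allocating a full None-grid and overwriting every cell through a nested index loop.
-- outside the precondition, e.g. on set_margins([[], [None]], -1): A returns [], B returns [[], []]
import Mathlib
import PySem

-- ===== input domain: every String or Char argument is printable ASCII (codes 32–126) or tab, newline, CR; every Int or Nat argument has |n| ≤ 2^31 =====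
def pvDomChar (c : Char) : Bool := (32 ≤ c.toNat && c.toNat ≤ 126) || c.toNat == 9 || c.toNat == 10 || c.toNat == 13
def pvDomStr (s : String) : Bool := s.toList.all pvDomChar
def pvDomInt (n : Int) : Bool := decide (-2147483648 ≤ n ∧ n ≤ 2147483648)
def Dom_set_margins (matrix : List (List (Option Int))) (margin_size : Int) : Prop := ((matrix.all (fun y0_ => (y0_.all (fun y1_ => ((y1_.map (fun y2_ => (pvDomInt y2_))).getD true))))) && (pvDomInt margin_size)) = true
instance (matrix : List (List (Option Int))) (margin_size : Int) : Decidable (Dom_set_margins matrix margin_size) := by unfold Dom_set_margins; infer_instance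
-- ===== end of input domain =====

-- B builds the padded matrix row-by-row by concatenation instead of allocating a None-grid
-- and overwriting cells in a nested loop (objective: simpler).

-- ===== PORT A =====

-- Python `xs[i] = v` on a list of rows / of cells: exact for 0 ≤ i < xs.length,
-- which Pre_set_margins guarantees for every assignment A performs.
def listSetI (xs : List (Option Int)) (i : Int) (v : Option Int) : List (Option Int) :=
  if 0 ≤ i then xs.set i.toNat v else xs

def gridSetI (g : List (List (Option Int))) (i : Int) (row : List (Option Int)) :
    List (List (Option Int)) :=
  if 0 ≤ i then g.set i.toNat row else g

def set_margins (matrix : List (List (Option Int))) (margin_size : Int) :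
    List (List (Option Int)) :=
  let rows : Int := matrix.length
  -- len(matrix[0]); Pre_set_margins excludes the empty matrix, where Python raises IndexError
  let cols : Int := (matrix.headD []).length
  let new_rows : Int := 2 * margin_size + rows
  let new_cols : Int := 2 * margin_size + cols
  -- [[None] * new_cols for _ in range(new_rows)] (toNat = Python's empty list for a negative count)
  let grid := List.replicate new_rows.toNat (List.replicate new_cols.toNat (none : Option Int))
  (PySem.List.pyRange 0 rows 1).foldl (fun g i =>
    (PySem.List.pyRange 0 cols 1).foldl (fun g j =>
      -- matrix_with_margin[i+margin_size][j+margin_size] = matrix[i][j];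
      -- the reads matrix[i][j] are in range for every i,j of the ranges under Pre_set_margins
      gridSetI g (i + margin_size)
        (listSetI (g.getD (i + margin_size).toNat []) (j + margin_size)
          ((matrix.getD i.toNat []).getD j.toNat none))) g) grid

-- ===== PORT B =====

def set_margins_alt (matrix : List (List (Option Int))) (margin_size : Int) :
    List (List (Option Int)) :=
  let cols : Int := (matrix.headD []).length   -- len(matrix[0]); Pre_ excludes the empty matrix
  let new_cols : Int := 2 * margin_size + cols
  let side : List (Option Int) := List.replicate margin_size.toNat none
  let blank : List (List (Option Int)) :=
    List.replicate margin_size.toNat (List.replicate new_cols.toNat (none : Option Int))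
  blank ++ matrix.map (fun row => side ++ row.take cols.toNat ++ side) ++ blank

-- ===== PRECONDITION & SPEC =====

-- Pre_ excludes the inputs where A raises IndexError: the empty matrix, matrices with a row
-- shorter than the first row (matrix[i][j] is read out of range), and negative margin_size,
-- on which an assignment goes out of range of the shrunken grid whenever the first row is
-- nonempty; when the first row is empty a negative margin makes A return a grid silently
-- truncated by the negative margin, an accident of list-multiplication that B does not copy.
def Pre_set_margins (matrix : List (List (Option Int))) (margin_size : Int) : Prop :=
  matrix ≠ [] ∧ 0 ≤ margin_size ∧ ∀ row ∈ matrix, (matrix.headD []).length ≤ row.length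

instance (matrix : List (List (Option Int))) (margin_size : Int) :
    Decidable (Pre_set_margins matrix margin_size) := by unfold Pre_set_margins; infer_instance

def pvWitness_set_margins : List (List (Option Int)) × Int := ([[some 1, none], [some 2, some 3]], 1)

def Spec_set_margins (matrix : List (List (Option Int))) (margin_size : Int)
    (out : List (List (Option Int))) : Prop := out = set_margins_alt matrix margin_size

instance (matrix : List (List (Option Int))) (margin_size : Int) (out : List (List (Option Int))) :
    Decidable (Spec_set_margins matrix margin_size out) := by unfold Spec_set_margins; infer_instance

-- ===== CLAIM (what is proved, stated in full; the proofs are below) =====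
def Claim_equal_set_margins : Prop := ∀ (matrix : List (List (Option Int))) (margin_size : Int), Dom_set_margins matrix margin_size → Pre_set_margins matrix margin_size → Spec_set_margins matrix margin_size (set_margins matrix margin_size)

-- ===== LEMMAS AND PROOFS =====

-- Writing into a fixed row k commutes with the fold: the inner loop of A first updates
-- row k of the grid over and over; extract it to a fold on the row itself.
lemma foldSetRow (js : List Nat) : ∀ (g : List (List (Option Int))) (k : Nat)
    (F : List (Option Int) → Nat → List (Option Int)), k < g.length →
    js.foldl (fun g j => g.set k (F (g.getD k []) j)) g = g.set k (js.foldl F (g.getD k [])) := by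
  induction js with
  | nil =>
      intro g k F hk
      simp only [List.foldl_nil]
      rw [List.getD_eq_getElem _ _ hk, List.set_getElem_self]
  | cons j js ih =>
      intro g k F hk
      have hk' : k < (g.set k (F (g.getD k []) j)).length := by simpa using hk
      simp only [List.foldl_cons]
      rw [ih _ _ _ hk']
      rw [List.set_set]
      congr 1
      congr 1
      rw [List.getD_eq_getElem _ _ hk', List.getElem_set_self]

-- (xs ++ ys)[|xs| + k] = v writes into ys: the shape every assignment below has.
lemma set_append_len {a : Type} (xs ys : List a) (k : Nat) (v : a) :
    (xs ++ ys).set (xs.length + k) v = xs ++ ys.set k v := by simp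

-- (xs ++ ys)[|xs| + k] with default reads from ys.
lemma getD_append_len {a : Type} (xs ys : List a) (k : Nat) (d : a) :
    (xs ++ ys).getD (xs.length + k) d = ys.getD k d := by
  simp [List.getD_eq_getElem?_getD, List.getElem?_append_right (Nat.le_add_right xs.length k)]

-- The inner loop of A turns an all-None row into side ++ r.take C ++ side, one cell at a time.
lemma rowFold (r : List (Option Int)) (m C : Nat) (hC : C ≤ r.length) :
    ∀ c, c ≤ C →
    (List.range c).foldl (fun row j => row.set (j + m) (r.getD j none))
        (List.replicate m (none : Option Int) ++ (List.replicate C none ++ List.replicate m none))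
    = List.replicate m none ++ ((r.take c ++ List.replicate (C - c) none) ++ List.replicate m none)
  | 0, _ => by simp
  | (c + 1), h => by
      rw [List.range_succ, List.foldl_append, rowFold r m C hC c (by omega)]
      have hsplit : C - c = (C - (c + 1)) + 1 := by omega
      have htake : (r.take c).length = c := by simp; omega
      have hgetD : r.getD c none = r[c]'(by omega) := List.getD_eq_getElem r none (by omega)
      simp only [List.foldl_cons, List.foldl_nil]
      have h1 : c + m = (List.replicate m (none : Option Int)).length + c := by
        simp [Nat.add_comm]
      rw [h1, set_append_len, List.append_assoc (r.take c)]
      have h2 := set_append_len (r.take c)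
        (List.replicate (C - c) (none : Option Int) ++ List.replicate m none) 0 (r.getD c none)
      rw [htake, Nat.add_zero] at h2
      rw [h2, hsplit, List.replicate_succ]
      have hc : c < r.length := by omega
      rw [List.cons_append, List.set_cons_zero, hgetD, List.append_cons,
        ← List.take_succ_eq_append_getElem hc]
      simp [List.append_assoc]

-- The outer loop of A, row by row: invariant after c rows processed.
lemma gridFold (matrix : List (List (Option Int))) (m C : Nat)
    (hC : ∀ row ∈ matrix, C ≤ row.length) :
    ∀ c, c ≤ matrix.length →
    (List.range c).foldl (fun g i =>
        (List.range C).foldl (fun g j =>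
          g.set (i + m) ((g.getD (i + m) []).set (j + m) ((matrix.getD i []).getD j none))) g)
      (List.replicate m (List.replicate m (none : Option Int) ++ (List.replicate C none ++ List.replicate m none)) ++
        (List.replicate matrix.length (List.replicate m (none : Option Int) ++ (List.replicate C none ++ List.replicate m none)) ++
         List.replicate m (List.replicate m (none : Option Int) ++ (List.replicate C none ++ List.replicate m none))))
    = List.replicate m (List.replicate m (none : Option Int) ++ (List.replicate C none ++ List.replicate m none)) ++
      ((matrix.take c).map (fun row => List.replicate m (none : Option Int) ++ (row.take C ++ List.replicate m none)) ++
       (List.replicate (matrix.length - c) (List.replicate m (none : Option Int) ++ (List.replicate C none ++ List.replicate m none)) ++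
        List.replicate m (List.replicate m (none : Option Int) ++ (List.replicate C none ++ List.replicate m none))))
  | 0, _ => by simp
  | (c + 1), h => by
      rw [List.range_succ, List.foldl_append, gridFold matrix m C hC c (by omega)]
      simp only [List.foldl_cons, List.foldl_nil]
      have hcR : c < matrix.length := by omega
      have hrow : matrix.getD c [] = matrix[c] := List.getD_eq_getElem matrix [] hcR
      have hC' : C ≤ (matrix.getD c []).length := by
        rw [hrow]; exact hC _ (List.getElem_mem hcR)
      have hmaplen : ((matrix.take c).map (fun row =>
          List.replicate m (none : Option Int) ++ (row.take C ++ List.replicate m none))).length = c := by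
        simp; omega
      have hsplit : matrix.length - c = (matrix.length - (c + 1)) + 1 := by omega
      set blank : List (Option Int) :=
        List.replicate m (none : Option Int) ++ (List.replicate C none ++ List.replicate m none) with hblank
      set G : List (List (Option Int)) :=
        List.replicate m blank ++
          ((matrix.take c).map (fun row => List.replicate m (none : Option Int) ++ (row.take C ++ List.replicate m none)) ++
           (List.replicate (matrix.length - c) blank ++ List.replicate m blank)) with hG
      have hk : c + m < G.length := by simp [hG]; omega
      rw [foldSetRow (List.range C) G (c + m)
        (fun row j => row.set (j + m) ((matrix.getD c []).getD j none)) hk]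
      have hget : G.getD (c + m) [] = blank := by
        rw [hG]
        have e1 : c + m = (List.replicate m blank).length + c := by simp [Nat.add_comm]
        rw [e1, getD_append_len]
        have e2 := getD_append_len
          ((matrix.take c).map (fun row => List.replicate m (none : Option Int) ++ (row.take C ++ List.replicate m none)))
          (List.replicate (matrix.length - c) blank ++ List.replicate m blank) 0 ([] : List (Option Int))
        rw [hmaplen, Nat.add_zero] at e2
        rw [e2, hsplit, List.replicate_succ]
        rfl
      rw [hget, hblank, rowFold (matrix.getD c []) m C hC' C le_rfl]
      simp only [Nat.sub_self, List.replicate_zero, List.append_nil]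
      rw [hG, hsplit, List.replicate_succ]
      have e3 : c + m = (List.replicate m blank).length + c := by simp [Nat.add_comm]
      rw [e3, set_append_len]
      have e4 := set_append_len
        ((matrix.take c).map (fun row => List.replicate m (none : Option Int) ++ (row.take C ++ List.replicate m none)))
        ((blank :: List.replicate (matrix.length - (c + 1)) blank) ++ List.replicate m blank) 0
        (List.replicate m (none : Option Int) ++ ((matrix.getD c []).take C ++ List.replicate m none))
      rw [hmaplen] at e4
      simp only [Nat.add_zero] at e4
      rw [e4, List.cons_append, List.set_cons_zero, hrow,
        List.take_succ_eq_append_getElem hcR, List.map_append]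
      simp [List.append_assoc, hblank]

-- ===== VERDICT (by name: the statement is the Claim_ definition above) =====
theorem set_margins_spec : Claim_equal_set_margins := by
  intro matrix margin_size _ hpre
  obtain ⟨hne, hm0, hrows⟩ := hpre
  unfold Spec_set_margins set_margins set_margins_alt
  have hm : margin_size = ((margin_size.toNat : Nat) : Int) := (Int.toNat_of_nonneg hm0).symm
  set m : Nat := margin_size.toNat with hmdef
  set C : Nat := (matrix.headD []).length with hCdef
  set R : Nat := matrix.length with hRdef
  -- the two pyRanges are ranges of naturals
  simp only [hm, PySem.List.pyRange_zero_natCast, List.foldl_map]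
  -- index arithmetic: every assignment and read is at a nonnegative in-range index
  simp only [gridSetI, listSetI, ← Nat.cast_add, Int.natCast_nonneg, if_pos, Int.toNat_natCast]
  -- the initial grid, reshaped for gridFold
  have hdim : ((2 * ((m : Nat) : Int) + ((R : Nat) : Int)).toNat) = m + (R + m) := by omega
  have hdimc : ((2 * ((m : Nat) : Int) + ((C : Nat) : Int)).toNat) = m + (C + m) := by omega
  rw [hdim, hdimc, List.replicate_add, List.replicate_add m (C + m), List.replicate_add R m,
    List.replicate_add C m]
  have := gridFold matrix m C hrows R le_rfl
  rw [List.take_length] at this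
  rw [this]
  have h0 : matrix.length - R = 0 := by rw [hRdef]; omega
  simp [h0, List.append_assoc]
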